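-- pv_equiv track=rewrite | github.com/h-lu/bid-evaluation-assistant | app/parse_utils.py | select_content_source
-- ===== SOURCE A (Python) =====
-- from typing import Iterable
--
-- def select_content_source(files: Iterable[str]) -> str | None:
--     names = list(files)
--     for name in names:
--         if name.endswith("content_list.json"):
--             return name
--     for name in names:
--         if name.endswith("context_list.json"):
--             return name
--     return None
-- ===== SOURCE B (Python) =====
-- def select_content_source(files):
--     first_context = None
--     for name in files:
--         if name.endswith("content_list.json"):
--             return name
--         if first_context is None and name.endswith("context_list.json"):
--             first_context = name
--     return first_context
-- ===== Notes on version B (the rewrite author's own statement) =====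
-- stated objective: simpler
-- what changed: Replaces the two sequential scans (content first, then context) by one pass that returns immediately on a content match and keeps the first context match as a held-over fallback.
import Mathlib
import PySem

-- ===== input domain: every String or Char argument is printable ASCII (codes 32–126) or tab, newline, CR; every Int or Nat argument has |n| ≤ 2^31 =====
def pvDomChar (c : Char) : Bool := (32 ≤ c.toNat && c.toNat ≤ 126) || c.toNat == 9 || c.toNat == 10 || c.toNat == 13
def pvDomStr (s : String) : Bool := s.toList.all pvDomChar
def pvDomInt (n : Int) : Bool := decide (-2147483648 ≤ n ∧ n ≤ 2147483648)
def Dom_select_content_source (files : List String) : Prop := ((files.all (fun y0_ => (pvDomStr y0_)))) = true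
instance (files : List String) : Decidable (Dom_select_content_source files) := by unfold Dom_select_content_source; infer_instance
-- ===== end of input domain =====

-- B merges A's two sequential scans into one pass holding the first context match as a fallback (objective: simpler).

-- ===== PORT A =====
-- A: first scan returns the first name ending with "content_list.json";
-- a second scan returns the first name ending with "context_list.json"; else None.
def select_content_source (files : List String) : Option String :=
  match files.find? (fun name => PySem.Str.endswith name "content_list.json") with
  | some name => some name
  | none =>
    match files.find? (fun name => PySem.Str.endswith name "context_list.json") with
    | some name => some name
    | none => none

-- ===== PORT B =====
-- B: one pass; return immediately on a content match, hold the first context match as fallback.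
def select_content_source_alt_go (names : List String) (first_context : Option String) : Option String :=
  match names with
  | [] => first_context
  | name :: rest =>
    if PySem.Str.endswith name "content_list.json" then some name
    else if first_context.isNone && PySem.Str.endswith name "context_list.json" then
      select_content_source_alt_go rest (some name)
    else
      select_content_source_alt_go rest first_context

def select_content_source_alt (files : List String) : Option String :=
  select_content_source_alt_go files none

-- ===== PRECONDITION & SPEC =====
def Spec_select_content_source (files : List String) (out : Option String) : Prop := out = select_content_source_alt files
instance (files : List String) (out : Option String) : Decidable (Spec_select_content_source files out) := by unfold Spec_select_content_source; infer_instance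

-- ===== CLAIM (what is proved, stated in full; the proofs are below) =====
def Claim_equal_select_content_source : Prop := ∀ (files : List String), Dom_select_content_source files → Spec_select_content_source files (select_content_source files)

-- ===== LEMMAS AND PROOFS =====

-- loop invariant: the single pass with fallback acc equals "content match first, else acc, else context match"
theorem alt_go_eq (names : List String) (acc : Option String) :
    select_content_source_alt_go names acc =
      match names.find? (fun name => PySem.Str.endswith name "content_list.json") with
      | some n => some n
      | none =>
        match acc with
        | some a => some a
        | none => names.find? (fun name => PySem.Str.endswith name "context_list.json") := by
  induction names generalizing acc with
  | nil => cases acc <;> simp [select_content_source_alt_go]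
  | cons name rest ih =>
    simp only [select_content_source_alt_go, List.find?]
    by_cases h1 : PySem.Str.endswith name "content_list.json"
    · simp only [h1, if_true]
    · simp only [h1, Bool.false_eq_true, if_false]
      by_cases h2 : PySem.Str.endswith name "context_list.json"
      · simp only [h2]
        cases acc with
        | some a =>
          simp only [Option.isNone_some, Bool.false_and, Bool.false_eq_true, if_false, ih]
        | none =>
          simp only [Option.isNone_none, Bool.true_and, if_true, ih]
      · simp only [h2, Bool.and_false, Bool.false_eq_true, if_false, ih]

-- ===== VERDICT (by name: the statement is the Claim_ definition above) =====
theorem select_content_source_spec : Claim_equal_select_content_source := by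
  intro files _
  unfold Spec_select_content_source select_content_source select_content_source_alt
  rw [alt_go_eq]
  cases files.find? (fun name => PySem.Str.endswith name "content_list.json") <;>
    cases hf : files.find? (fun name => PySem.Str.endswith name "context_list.json") <;> simp
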